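-- pv_equiv track=rewrite | github.com/haturusinghe/subasa-plm | src/dataset/dataset.py | categorize_offensive_phrases
-- ===== SOURCE A (Python) =====
-- def categorize_offensive_phrases(offensive_single_word_list_with_pos_tags):
--     """
--         POS Tag and Meaning:
--
--         NNC - Common Noun
--         NNP - Proper Noun
--         PRP - Pronoun
--         QUE - Questioning Pronoun
--         NDT - Deterministic Pronoun
--         QBE - Question Based Pronoun
--         VFM - Verb Finite
--         VP - Verb Particle
--         VNN - Verbal Noun
--         AUX - Modal Auxiliary
--         VNF - Verb Non Finite
--         NCV - Noun in Compound Verb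
--         JCV - Adjective in Compound Verb
--         RRPCV - Particle in Compound Verb
--         JJ - Adjective
--         NNJ - Adjectival Noun
--         RB - Adverbs
--         POST - Postposition
--         CC - Conjunction
--         RP - Particle
--         DET - Determiner
--         CM - Case Maker
--         NVB - Noun in Sentence Ending
--         NUM - Number
--         ABB - Abbreviation
--         FS - Full Stop
--         PUNC - Punctuation
--         FRW - Foreign Word
--         UNK - Undefined
--
--     """
--
--     categorized = {}
--     # Initialize the structure with an empty dict for each tag we encounter
--     for _, tag in offensive_single_word_list_with_pos_tags:
--         if tag not in categorized:
--             categorized[tag] = {}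
--
--     # Count occurrences of each word for each POS tag
--     for word, tag in offensive_single_word_list_with_pos_tags:
--         if word not in categorized[tag]:
--             categorized[tag][word] = 0
--         categorized[tag][word] += 1
--
--     return categorized
-- ===== SOURCE B (Python) =====
-- def categorize_offensive_phrases(offensive_single_word_list_with_pos_tags):
--     # Stage 1: distinct tags in first-occurrence order.
--     tags = []
--     for _, tag in offensive_single_word_list_with_pos_tags:
--         if tag not in tags:
--             tags.append(tag)
--     # Stage 2: per tag, gather its words and count each distinct word by scanning.
--     result = {}
--     for tag in tags:
--         words = [w for w, t in offensive_single_word_list_with_pos_tags if t == tag]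
--         seen = []
--         for w in words:
--             if w not in seen:
--                 seen.append(w)
--         result[tag] = {w: words.count(w) for w in seen}
--     return result
-- ===== Notes on version B (the rewrite author's own statement) =====
-- stated objective: alternative
-- what changed: A makes two passes over the input counting incrementally into a pre-seeded nested dict; B never increments: it deduplicates the tags, then for each tag filters out that tag's words and computes each distinct word's count by a whole-list .count scan, building each inner dict in one comprehension.
import Mathlib
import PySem

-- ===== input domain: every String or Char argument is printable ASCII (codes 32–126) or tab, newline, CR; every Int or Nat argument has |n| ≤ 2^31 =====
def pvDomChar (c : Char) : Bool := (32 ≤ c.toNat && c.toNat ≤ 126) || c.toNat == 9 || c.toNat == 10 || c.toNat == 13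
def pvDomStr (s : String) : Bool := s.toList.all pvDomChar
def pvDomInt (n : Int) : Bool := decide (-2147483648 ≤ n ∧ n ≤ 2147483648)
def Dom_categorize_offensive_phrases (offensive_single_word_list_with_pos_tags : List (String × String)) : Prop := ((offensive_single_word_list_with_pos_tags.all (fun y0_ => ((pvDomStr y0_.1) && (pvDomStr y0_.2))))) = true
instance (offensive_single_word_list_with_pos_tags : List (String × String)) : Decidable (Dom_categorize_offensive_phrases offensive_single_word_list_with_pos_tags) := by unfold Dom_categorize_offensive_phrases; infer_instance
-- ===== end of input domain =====

-- B replaces A's incremental counting into a pre-seeded nested dict with a scan-based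
-- decomposition: dedup the tags, then per tag filter its words and count each distinct
-- word by a whole-list .count scan (objective: alternative algorithm, no increments).

-- ===== PORT A =====
def categorize_offensive_phrases (offensive_single_word_list_with_pos_tags : List (String × String)) : List (String × List (String × Int)) :=
  -- first loop: initialize an empty dict for each tag encountered
  let categorized : PySem.Dict String (PySem.Dict String Int) :=
    offensive_single_word_list_with_pos_tags.foldl
      (fun d p => if d.contains p.2 then d else d.insert p.2 PySem.Dict.empty) PySem.Dict.empty
  -- second loop: count occurrences of each word for each POS tag
  let categorized : PySem.Dict String (PySem.Dict String Int) :=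
    offensive_single_word_list_with_pos_tags.foldl
      (fun d p =>
        let inner := d.getD p.2 PySem.Dict.empty  -- categorized[tag]; the key is always present after the first loop
        let inner := if inner.contains p.1 then inner else inner.insert p.1 (0 : Int)
        d.insert p.2 (inner.modify p.1 0 (· + 1)))  -- categorized[tag][word] += 1 (the key is present here)
      categorized
  categorized.items.map (fun q => (q.1, q.2.items))

-- ===== PORT B =====
def categorize_offensive_phrases_alt (offensive_single_word_list_with_pos_tags : List (String × String)) : List (String × List (String × Int)) :=
  -- stage 1: distinct tags in first-occurrence order (a plain list membership loop)
  let tags : List String :=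
    offensive_single_word_list_with_pos_tags.foldl
      (fun ts p => if ts.contains p.2 then ts else ts ++ [p.2]) []
  -- stage 2: per tag, gather its words and count each distinct word by scanning
  let result : PySem.Dict String (PySem.Dict String Int) :=
    tags.foldl
      (fun r tag =>
        let words : List String :=
          (offensive_single_word_list_with_pos_tags.filter (fun p => p.2 == tag)).map (fun p => p.1)
        let seen : List String := words.foldl (fun s w => if s.contains w then s else s ++ [w]) []
        r.insert tag (seen.foldl (fun d w => d.insert w ((words.count w : Int))) PySem.Dict.empty))
      PySem.Dict.empty
  result.items.map (fun q => (q.1, q.2.items))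

-- ===== PRECONDITION & SPEC =====
def Spec_categorize_offensive_phrases (offensive_single_word_list_with_pos_tags : List (String × String)) (out : List (String × List (String × Int))) : Prop := out = categorize_offensive_phrases_alt offensive_single_word_list_with_pos_tags
instance (offensive_single_word_list_with_pos_tags : List (String × String)) (out : List (String × List (String × Int))) : Decidable (Spec_categorize_offensive_phrases offensive_single_word_list_with_pos_tags out) := by unfold Spec_categorize_offensive_phrases; infer_instance

-- ===== CLAIM (what is proved, stated in full; the proofs are below) =====
def Claim_equal_categorize_offensive_phrases : Prop := ∀ (offensive_single_word_list_with_pos_tags : List (String × String)), Dom_categorize_offensive_phrases offensive_single_word_list_with_pos_tags → Spec_categorize_offensive_phrases offensive_single_word_list_with_pos_tags (categorize_offensive_phrases offensive_single_word_list_with_pos_tags)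

-- ===== LEMMAS AND PROOFS =====

theorem pvUpdate_self {α : Type} [BEq α] [LawfulBEq α] (s : PySem.Set α) (xs : List α)
    (h : ∀ x ∈ xs, x ∈ s) : PySem.Set.update s xs = s := by
  rw [PySem.Set.update_eq_append_filter, List.filter_eq_nil_iff.2, List.append_nil]
  intro y hy
  simp only [Bool.not_eq_true', Bool.not_eq_false]
  exact (PySem.Set.contains_iff _ _).2 (h y ((PySem.Set.mem_ofList _ _).1 hy))

theorem pvStepA_eq :
    (fun (d : PySem.Dict String (PySem.Dict String Int)) (p : String × String) =>
      let inner := d.getD p.2 PySem.Dict.empty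
      let inner := if inner.contains p.1 then inner else inner.insert p.1 (0 : Int)
      d.insert p.2 (inner.modify p.1 0 (· + 1)))
    = (fun d p => d.modify p.2 PySem.Dict.empty (fun i => i.modify p.1 0 (· + 1))) := by
  funext d p
  show d.insert p.2 _ = d.insert p.2 ((d.getD p.2 PySem.Dict.empty).modify p.1 0 (· + 1))
  congr 1
  by_cases h : (d.getD p.2 PySem.Dict.empty).contains p.1
  · simp only [h, if_true]
  · simp only [h, if_false, Bool.false_eq_true]
    show ((d.getD p.2 PySem.Dict.empty).insert p.1 0).insert p.1
        (((d.getD p.2 PySem.Dict.empty).insert p.1 0).getD p.1 0 + 1)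
      = (d.getD p.2 PySem.Dict.empty).insert p.1
        ((d.getD p.2 PySem.Dict.empty).getD p.1 0 + 1)
    rw [PySem.Dict.getD_insert_self, PySem.Dict.insert_insert_self,
        PySem.Dict.getD_of_not_contains (d.getD p.2 PySem.Dict.empty) (0 : Int)
          (Bool.not_eq_true _ ▸ h)]

theorem pvGetD_foldl_modify {κ ν β : Type} [BEq κ] [LawfulBEq κ] [DecidableEq κ]
    (l : List β) (key : β → κ) (d0 : ν) (g : β → ν → ν) (d : PySem.Dict κ ν) (t : κ) :
    (l.foldl (fun d x => d.modify (key x) d0 (g x)) d).getD t d0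
      = (l.filter (fun x => key x == t)).foldl (fun v x => g x v) (d.getD t d0) := by
  induction l generalizing d with
  | nil => rfl
  | cons x l ih =>
    rw [List.foldl_cons, List.filter_cons, ih]
    by_cases h : key x = t
    · simp [h]
    · have hb : (key x == t) = false := beq_eq_false_iff_ne.2 h
      simp [hb, PySem.Dict.getD_modify, Ne.symm h]

def pvTagsOf (l : List (String × String)) : PySem.Set String :=
  PySem.Set.ofList (l.map (fun p => p.2))
def pvWordsOf (l : List (String × String)) (t : String) : List String :=
  (l.filter (fun p => p.2 == t)).map (fun p => p.1)
def pvInnerOf (l : List (String × String)) (t : String) : PySem.Dict String Int :=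
  PySem.Dict.counter (pvWordsOf l t)
def pvInitA (l : List (String × String)) : PySem.Dict String (PySem.Dict String Int) :=
  l.foldl (fun d p => if d.contains p.2 then d else d.insert p.2 PySem.Dict.empty) PySem.Dict.empty
def pvDictA (l : List (String × String)) : PySem.Dict String (PySem.Dict String Int) :=
  l.foldl
    (fun d p =>
      let inner := d.getD p.2 PySem.Dict.empty
      let inner := if inner.contains p.1 then inner else inner.insert p.1 (0 : Int)
      d.insert p.2 (inner.modify p.1 0 (· + 1)))
    (pvInitA l)
def pvInnerB (l : List (String × String)) (t : String) : PySem.Dict String Int :=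
  ((pvWordsOf l t).foldl (fun s w => if s.contains w then s else s ++ [w]) []).foldl
    (fun d w => d.insert w (((pvWordsOf l t).count w : Int))) PySem.Dict.empty
def pvDictB (l : List (String × String)) : PySem.Dict String (PySem.Dict String Int) :=
  (l.foldl (fun ts p => if ts.contains p.2 then ts else ts ++ [p.2]) []).foldl
    (fun r tag => r.insert tag (pvInnerB l tag)) PySem.Dict.empty

theorem pvKeys_initA (l : List (String × String)) : (pvInitA l).keys = pvTagsOf l := by
  unfold pvInitA pvTagsOf
  induction l using List.reverseRecOn with
  | nil => rfl
  | append_singleton l p ih =>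
    rw [List.foldl_append, List.foldl_cons, List.foldl_nil, List.map_append,
        List.map_singleton, PySem.Set.ofList_append_singleton, ← ih]
    set d := l.foldl (fun d p => if d.contains p.2 then d else d.insert p.2 PySem.Dict.empty)
      PySem.Dict.empty with hd
    by_cases h : d.contains p.2
    · rw [if_pos h, PySem.Set.add_of_mem]
      exact (PySem.Dict.contains_iff_mem_keys _ _).1 h
    · rw [if_neg h, PySem.Dict.keys_insert_of_not_contains _ _ (Bool.not_eq_true _ ▸ h),
          PySem.Set.add_of_not_mem]
      exact fun hm => h ((PySem.Dict.contains_iff_mem_keys _ _).2 hm)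

theorem pvGetD_initA_aux (l : List (String × String))
    (d : PySem.Dict String (PySem.Dict String Int))
    (hd : ∀ t, d.getD t PySem.Dict.empty = PySem.Dict.empty) (t : String) :
    (l.foldl (fun d p => if d.contains p.2 then d else d.insert p.2 PySem.Dict.empty) d).getD t
      PySem.Dict.empty = PySem.Dict.empty := by
  induction l generalizing d with
  | nil => exact hd t
  | cons p l ih =>
    rw [List.foldl_cons]
    refine ih _ (fun s => ?_)
    by_cases h : d.contains p.2
    · rw [if_pos h]; exact hd s
    · rw [if_neg h, PySem.Dict.getD_insert]
      split_ifs with hs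
      · rfl
      · exact hd s

theorem pvGetD_initA (l : List (String × String)) (t : String) :
    (pvInitA l).getD t PySem.Dict.empty = PySem.Dict.empty :=
  pvGetD_initA_aux l PySem.Dict.empty (fun _ => rfl) t

theorem pvDictA_eq (l : List (String × String)) :
    pvDictA l = l.foldl
      (fun d p => d.modify p.2 PySem.Dict.empty (fun i => i.modify p.1 0 (· + 1)))
      (pvInitA l) := by
  unfold pvDictA
  rw [pvStepA_eq]

theorem pvKeysA (l : List (String × String)) : (pvDictA l).keys = pvTagsOf l := by
  rw [pvDictA_eq,
      PySem.Dict.keys_foldl_modify_key l (fun p => p.2) PySem.Dict.empty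
        (fun _ p => fun i => i.modify p.1 0 (· + 1)),
      pvKeys_initA, pvUpdate_self]
  intro x hx
  unfold pvTagsOf
  exact (PySem.Set.mem_ofList _ _).2 hx

theorem pvGetDA (l : List (String × String)) (t : String) :
    (pvDictA l).getD t PySem.Dict.empty = pvInnerOf l t := by
  rw [pvDictA_eq,
      pvGetD_foldl_modify l (fun p => p.2) PySem.Dict.empty
        (fun p => fun i => i.modify p.1 0 (· + 1)) (pvInitA l) t,
      pvGetD_initA]
  unfold pvInnerOf pvWordsOf
  rw [PySem.Dict.counter_eq_foldl, List.foldl_map]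

theorem pvItemsA (l : List (String × String)) :
    (pvDictA l).items = (pvTagsOf l).map (fun t => (t, pvInnerOf l t)) := by
  rw [PySem.Dict.items_eq_map_keys _ (by rw [pvKeysA]; exact PySem.Set.nodup_ofList _)
        PySem.Dict.empty, pvKeysA]
  exact List.map_congr_left (fun t _ => by rw [pvGetDA])

-- the dedup loop over a list IS PySem.Set.ofList (same step function, definitionally)
theorem pvDedup_eq_ofList (xs : List String) :
    xs.foldl (fun s w => if s.contains w then s else s ++ [w]) [] = PySem.Set.ofList xs := rfl

theorem pvTagsFold (l : List (String × String)) :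
    l.foldl (fun ts p => if ts.contains p.2 then ts else ts ++ [p.2]) [] = pvTagsOf l := by
  unfold pvTagsOf
  rw [PySem.Set.ofList_eq_foldl, List.foldl_map]
  rfl

theorem pvInnerB_eq (l : List (String × String)) (t : String) :
    pvInnerB l t = pvInnerOf l t := by
  unfold pvInnerB pvInnerOf
  apply PySem.Dict.ext
  rw [pvDedup_eq_ofList, PySem.Dict.items_counter,
      PySem.Dict.items_foldl_insert_fresh (PySem.Set.ofList (pvWordsOf l t))
        (fun w => w) (fun w => ((pvWordsOf l t).count w : Int)) PySem.Dict.empty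
        (fun a _ => PySem.Dict.contains_empty _)
        (by simp)]
  rfl

theorem pvItemsB (l : List (String × String)) :
    (pvDictB l).items = (pvTagsOf l).map (fun t => (t, pvInnerOf l t)) := by
  unfold pvDictB
  rw [pvTagsFold,
      PySem.Dict.items_foldl_insert_fresh (pvTagsOf l) (fun tag => tag)
        (fun tag => pvInnerB l tag) PySem.Dict.empty
        (fun a _ => PySem.Dict.contains_empty _)
        (by simp [pvTagsOf])]
  exact Eq.trans rfl (List.map_congr_left (fun t _ => by rw [pvInnerB_eq]))

theorem pvA_def (l : List (String × String)) :
    categorize_offensive_phrases l = (pvDictA l).items.map (fun q => (q.1, q.2.items)) := rfl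

theorem pvB_def (l : List (String × String)) :
    categorize_offensive_phrases_alt l = (pvDictB l).items.map (fun q => (q.1, q.2.items)) := rfl

-- ===== VERDICT (by name: the statement is the Claim_ definition above) =====
theorem categorize_offensive_phrases_spec : Claim_equal_categorize_offensive_phrases := by
  intro l _
  show _ = _
  rw [pvA_def, pvB_def, pvItemsA, pvItemsB]
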